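-- pv_equiv track=rewrite | github.com/ShibilAhamed701212/clockwork | clockwork/rules/rule_engine.py | _check_schema_without_migration
-- ===== SOURCE A (Python) =====
-- SCHEMA_FILE_PATTERNS = [
--     "schema.sql",
--     "schema.py",
--     "models.py",
--     "models.sql",
--     "create_tables",
--     "db_schema",
--     "database_schema",
-- ]
--
-- MIGRATION_PATTERNS = [
--     "migrations/",
--     "migration/",
--     "alembic/",
--     "flyway/",
--     "migrate_",
--     "_migration",
--     "001_",
--     "002_",
--     "003_",
-- ]
--
-- def _check_schema_without_migration(file_paths: list[str]) -> str | None: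
--     has_schema = any(
--         any(p in fp.lower() for p in SCHEMA_FILE_PATTERNS) for fp in file_paths
--     )
--     has_migration = any(
--         any(p in fp.lower() for p in MIGRATION_PATTERNS) for fp in file_paths
--     )
--     if has_schema and not has_migration:
--         schema_files = [
--             fp
--             for fp in file_paths
--             if any(p in fp.lower() for p in SCHEMA_FILE_PATTERNS)
--         ]
--         return f"Rule [no_schema_change_without_migration]: Schema file(s) detected ({', '.join(schema_files[:3])}) but no migration files found."
--     return None
-- ===== SOURCE B (Python) =====
-- SCHEMA_FILE_PATTERNS = [
--     "schema.sql",
--     "schema.py",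
--     "models.py",
--     "models.sql",
--     "create_tables",
--     "db_schema",
--     "database_schema",
-- ]
--
-- MIGRATION_PATTERNS = [
--     "migrations/",
--     "migration/",
--     "alembic/",
--     "flyway/",
--     "migrate_",
--     "_migration",
--     "001_",
--     "002_",
--     "003_",
-- ]
--
-- def _check_schema_without_migration(file_paths: list[str]) -> str | None:
--     # Single pass with early abort: any migration file means the answer is None,
--     # so return immediately; only the first 3 schema paths are ever reported,
--     # so keep a bounded buffer of at most 3 instead of the full filtered list.
--     first3 = []
--     for fp in file_paths:
--         low = fp.lower()
--         if any(p in low for p in MIGRATION_PATTERNS):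
--             return None
--         if len(first3) < 3 and any(p in low for p in SCHEMA_FILE_PATTERNS):
--             first3.append(fp)
--     if first3:
--         return f"Rule [no_schema_change_without_migration]: Schema file(s) detected ({', '.join(first3)}) but no migration files found."
--     return None
-- ===== Notes on version B (the rewrite author's own statement) =====
-- stated objective: alternative
-- what changed: Replaces A's three full scans (two any() passes plus a filter comprehension building the whole schema list) with one short-circuiting pass that returns None immediately at the first migration match and maintains only a bounded buffer of at most 3 schema paths (all the message ever uses) instead of the full filtered list.
import Mathlib
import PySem

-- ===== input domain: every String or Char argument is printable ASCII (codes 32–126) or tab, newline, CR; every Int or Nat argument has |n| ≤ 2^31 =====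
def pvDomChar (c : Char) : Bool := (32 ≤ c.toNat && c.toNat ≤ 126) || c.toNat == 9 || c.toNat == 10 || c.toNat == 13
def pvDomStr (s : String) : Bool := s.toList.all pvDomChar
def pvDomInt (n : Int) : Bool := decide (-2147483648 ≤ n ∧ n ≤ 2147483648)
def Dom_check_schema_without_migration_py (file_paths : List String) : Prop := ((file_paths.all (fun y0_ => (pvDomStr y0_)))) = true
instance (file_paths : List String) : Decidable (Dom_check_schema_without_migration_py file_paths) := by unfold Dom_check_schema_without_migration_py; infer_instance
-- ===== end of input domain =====

-- B replaces A's three full scans by a single recursive pass that aborts (returns None)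
-- at the first migration match and keeps only a bounded buffer of at most 3 schema paths.


-- ===== PORT A =====
def pvSchemaPats : List String :=
  ["schema.sql", "schema.py", "models.py", "models.sql", "create_tables", "db_schema", "database_schema"]

def pvMigPats : List String :=
  ["migrations/", "migration/", "alembic/", "flyway/", "migrate_", "_migration", "001_", "002_", "003_"]

-- the shared inner test 'any(p in fp.lower() for p in PATS)'
def pvIsSchema (fp : String) : Bool := pvSchemaPats.any (fun p => PySem.Str.isIn p (PySem.Str.lower fp))
def pvIsMig (fp : String) : Bool := pvMigPats.any (fun p => PySem.Str.isIn p (PySem.Str.lower fp))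

def check_schema_without_migration_py (file_paths : List String) : Option String :=
  let has_schema := file_paths.any pvIsSchema
  let has_migration := file_paths.any pvIsMig
  if has_schema && !has_migration then
    let schema_files := file_paths.filter pvIsSchema
    some (PySem.Str.join ""
      ["Rule [no_schema_change_without_migration]: Schema file(s) detected (",
       PySem.Str.join ", " (PySem.List.slice schema_files none (some 3)),
       ") but no migration files found."])
  else
    none

-- ===== PORT B =====
-- B's f-string on its bounded buffer (no slicing in B)
def pvMsgB (first3 : List String) : String :=
  PySem.Str.join ""
    ["Rule [no_schema_change_without_migration]: Schema file(s) detected (",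
     PySem.Str.join ", " first3,
     ") but no migration files found."]

-- the loop of Source B: early return None on a migration match, bounded schema buffer
def pvAltGo (first3 : List String) (paths : List String) : Option String :=
  match paths with
  | [] => if !first3.isEmpty then some (pvMsgB first3) else none
  | fp :: rest =>
    if pvIsMig fp then none
    else
      let first3' := if first3.length < 3 && pvIsSchema fp then first3 ++ [fp] else first3
      pvAltGo first3' rest

def check_schema_without_migration_py_alt (file_paths : List String) : Option String :=
  pvAltGo [] file_paths

-- ===== PRECONDITION & SPEC =====
def Spec_check_schema_without_migration_py (file_paths : List String) (out : Option String) : Prop := out = check_schema_without_migration_py_alt file_paths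
instance (file_paths : List String) (out : Option String) : Decidable (Spec_check_schema_without_migration_py file_paths out) := by unfold Spec_check_schema_without_migration_py; infer_instance

-- ===== CLAIM (what is proved, stated in full; the proofs are below) =====
def Claim_equal_check_schema_without_migration_py : Prop := ∀ (file_paths : List String), Dom_check_schema_without_migration_py file_paths → Spec_check_schema_without_migration_py file_paths (check_schema_without_migration_py file_paths)

-- ===== LEMMAS AND PROOFS =====

-- characterisation of B's loop: given a buffer that is the 3-truncation of the already
-- filtered prefix, it computes A's branch on the remaining paths.
theorem pvAltGo_eq (l : List String) (acc : List String) (h : acc.length ≤ 3) :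
    pvAltGo acc l =
      if l.any pvIsMig then none
      else if (acc ++ l.filter pvIsSchema).isEmpty then none
      else some (pvMsgB ((acc ++ l.filter pvIsSchema).take 3)) := by
  induction l generalizing acc with
  | nil =>
    cases acc with
    | nil => simp [pvAltGo]
    | cons x xs =>
      simp only [pvAltGo, List.any_nil, List.filter_nil, List.append_nil, List.isEmpty_cons,
        Bool.not_false, if_true, Bool.false_eq_true, if_false]
      rw [List.take_of_length_le h]
  | cons x xs ih =>
    simp only [pvAltGo, List.any_cons, List.filter_cons]
    cases hm : pvIsMig x with
    | true => simp
    | false =>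
      simp only [Bool.false_or]
      cases hs : pvIsSchema x with
      | false =>
        simp only [Bool.and_false, Bool.false_eq_true, if_false]
        exact ih _ h
      | true =>
        simp only [Bool.and_true, if_true]
        by_cases hlen : acc.length < 3
        · rw [if_pos (show decide (acc.length < 3) = true by simp [hlen]), ih (acc ++ [x]) (by simp; omega)]
          simp [List.append_assoc]
        · rw [if_neg (show ¬ decide (acc.length < 3) = true by simp [hlen]), ih acc h]
          have hacc3 : acc.length = 3 := by omega
          have hne : acc ≠ [] := by intro hnil; rw [hnil] at hacc3; simp at hacc3
          have h1 : (acc ++ x :: xs.filter pvIsSchema).isEmpty = false := by simp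
          have h2 : (acc ++ xs.filter pvIsSchema).isEmpty = false := by simp [hne]
          simp only [h1, h2, Bool.false_eq_true, if_false]
          congr 3
          rw [List.take_append_of_le_length (by omega),
              List.take_append_of_le_length (by omega)]

-- filter-empty vs any
theorem pv_filter_isEmpty (p : String → Bool) (l : List String) :
    (l.filter p).isEmpty = !l.any p := by
  induction l with
  | nil => simp
  | cons x xs ih =>
    cases hx : p x <;> simp [hx, ih]

-- ===== VERDICT (by name: the statement is the Claim_ definition above) =====
theorem check_schema_without_migration_py_spec : Claim_equal_check_schema_without_migration_py := by
  intro file_paths _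
  unfold Spec_check_schema_without_migration_py
  unfold check_schema_without_migration_py check_schema_without_migration_py_alt
  rw [pvAltGo_eq _ _ (by simp)]
  simp only [List.nil_append, pv_filter_isEmpty]
  have hsl : PySem.List.slice (file_paths.filter pvIsSchema) none (some 3) =
      (file_paths.filter pvIsSchema).take 3 := by
    simpa using PySem.List.slice_to_natCast (file_paths.filter pvIsSchema) 3
  cases hm : file_paths.any pvIsMig with
  | true => simp
  | false =>
    cases hs : file_paths.any pvIsSchema with
    | true => simp [pvMsgB, hsl]
    | false => simp
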